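-- pv_equiv track=rewrite | github.com/GrahLnn/delta_context2 | src/delta_context2/utils/align.py | move_commas
-- ===== SOURCE A (Python) =====
-- def move_commas(en_list):
--     result = []
--     for i in range(len(en_list)):
--         if en_list[i].startswith(","):
--             # 如果当前句子以逗号开头，将逗号移到上一个句子末尾
--             if result:
--                 result[-1] += ","
--             # 移除当前句子的开头逗号
--             result.append(en_list[i][1:].strip())
--         else:
--             result.append(en_list[i].strip())
--     return result
-- ===== SOURCE B (Python) =====
-- def move_commas(en_list):
--     out = []
--     for cur, nxt in zip(en_list, en_list[1:] + [""]):
--         base = cur[1:].strip() if cur.startswith(",") else cur.strip()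
--         out.append(base + "," if nxt.startswith(",") else base)
--     return out
-- ===== Notes on version B (the rewrite author's own statement) =====
-- stated objective: alternative
-- what changed: B replaces A's back-mutating pass (appending a comma to the previously emitted element via result[-1]) with a forward look-ahead pass that decides each output element locally from the current and next input strings.
import Mathlib
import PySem

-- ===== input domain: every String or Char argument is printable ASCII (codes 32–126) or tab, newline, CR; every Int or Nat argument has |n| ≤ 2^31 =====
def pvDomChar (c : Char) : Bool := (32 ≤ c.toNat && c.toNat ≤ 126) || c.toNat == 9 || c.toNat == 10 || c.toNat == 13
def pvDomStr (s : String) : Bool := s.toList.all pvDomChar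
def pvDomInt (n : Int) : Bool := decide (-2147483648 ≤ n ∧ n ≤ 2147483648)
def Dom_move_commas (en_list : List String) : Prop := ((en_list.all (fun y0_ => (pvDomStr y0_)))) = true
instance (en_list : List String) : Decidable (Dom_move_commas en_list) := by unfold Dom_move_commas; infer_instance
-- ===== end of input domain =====

-- B replaces A's back-mutating pass (result[-1] += ",") with a forward look-ahead pass; alternative decomposition, same cost.


-- ===== PORT A =====
-- one loop iteration of A: possibly append "," to result's last element, then append the stripped current string
def mcStep (result : List String) (s : String) : List String :=
  if PySem.Str.startswith s "," then
    (match result.getLast? with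
     | some prev => result.dropLast ++ [prev ++ ","]
     | none => result)
    ++ [PySem.Str.strip (PySem.Str.slice s (some 1) none)]
  else
    result ++ [PySem.Str.strip s]

def move_commas (en_list : List String) : List String :=
  en_list.foldl mcStep []

-- ===== PORT B =====
-- forward look-ahead: base from the current string, comma appended iff the next raw string starts with ","
def move_commas_alt (en_list : List String) : List String :=
  match en_list with
  | [] => []
  | s :: rest =>
    let base := if PySem.Str.startswith s "," then PySem.Str.strip (PySem.Str.slice s (some 1) none)
                else PySem.Str.strip s
    (match rest with
     | t :: _ => if PySem.Str.startswith t "," then base ++ "," else base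
     | [] => base) :: move_commas_alt rest

-- ===== PRECONDITION & SPEC =====
def Spec_move_commas (en_list : List String) (out : List String) : Prop := out = move_commas_alt en_list
instance (en_list : List String) (out : List String) : Decidable (Spec_move_commas en_list out) := by unfold Spec_move_commas; infer_instance

-- ===== CLAIM (what is proved, stated in full; the proofs are below) =====
def Claim_equal_move_commas : Prop := ∀ (en_list : List String), Dom_move_commas en_list → Spec_move_commas en_list (move_commas en_list)

-- ===== LEMMAS AND PROOFS =====
def mcBump (result : List String) : List String :=
  match result.getLast? with
  | some prev => result.dropLast ++ [prev ++ ","]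
  | none => result

theorem mcBump_append (xs : List String) (y : String) :
    mcBump (xs ++ [y]) = xs ++ [y ++ ","] := by
  simp [mcBump]

theorem mcFold_eq (l : List String) : ∀ (acc : List String),
    l.foldl mcStep acc =
      (match l with
       | [] => acc
       | s :: _ => if PySem.Str.startswith s "," then mcBump acc else acc)
      ++ move_commas_alt l := by
  induction l with
  | nil => intro acc; simp [move_commas_alt]
  | cons s rest ih =>
    intro acc
    show rest.foldl mcStep (mcStep acc s) = _
    rw [ih]
    cases rest with
    | nil =>
      simp only [move_commas_alt, mcStep, mcBump]
      split_ifs <;> simp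
    | cons t rest' =>
      simp only [move_commas_alt, mcStep, mcBump]
      split_ifs <;> simp [mcBump_append]

theorem move_commas_spec' (en_list : List String) :
    move_commas en_list = move_commas_alt en_list := by
  rw [move_commas, mcFold_eq]
  cases en_list with
  | nil => rfl
  | cons s rest => simp [mcBump]

-- ===== VERDICT (by name: the statement is the Claim_ definition above) =====
theorem move_commas_spec : Claim_equal_move_commas := by
  intro en_list _
  exact move_commas_spec' en_list
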